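-- pv_equiv track=rewrite | github.com/RuYingran/SAND-Difference-analysis | main.py | count_trailing_zeros
-- ===== SOURCE A (Python) =====
-- def count_trailing_zeros(binary_num):
--     count = 0
--     for bit in reversed(binary_num):
--         if bit == '0':
--             count += 1
--         else:
--             break
--     return count
-- ===== SOURCE B (Python) =====
-- def count_trailing_zeros(binary_num):
--     count = 0
--     for bit in binary_num:
--         if bit == '0':
--             count += 1
--         else:
--             count = 0
--     return count
-- ===== Notes on version B (the rewrite author's own statement) =====
-- stated objective: alternative
-- what changed: B scans the string forward once with a resettable counter (increment on '0', reset on anything else) instead of A's reverse iteration with early break.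
import Mathlib
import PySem

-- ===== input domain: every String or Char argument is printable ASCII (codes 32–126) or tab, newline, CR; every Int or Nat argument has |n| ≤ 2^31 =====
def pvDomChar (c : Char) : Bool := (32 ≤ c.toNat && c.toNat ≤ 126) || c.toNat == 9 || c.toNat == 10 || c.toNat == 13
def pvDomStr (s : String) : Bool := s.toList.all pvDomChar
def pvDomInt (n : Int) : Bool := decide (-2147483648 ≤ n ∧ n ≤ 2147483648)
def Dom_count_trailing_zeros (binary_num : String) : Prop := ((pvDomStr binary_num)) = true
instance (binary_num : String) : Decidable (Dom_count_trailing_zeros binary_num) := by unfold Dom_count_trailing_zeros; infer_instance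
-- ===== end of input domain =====

-- B replaces A's reverse scan with early break by a single forward pass with a resettable counter (alternative decomposition, same cost).

-- ===== PORT A =====
-- A iterates over reversed(binary_num), counting '0's until the first non-'0' (break).
def ctzRevLoop : List Char → Int
  | [] => 0
  | bit :: rest => if bit = '0' then ctzRevLoop rest + 1 else 0

def count_trailing_zeros (binary_num : String) : Int :=
  ctzRevLoop binary_num.toList.reverse

-- ===== PORT B =====
-- B: forward pass, counter incremented on '0' and reset to 0 on any other char.
def count_trailing_zeros_alt (binary_num : String) : Int :=
  binary_num.toList.foldl (fun count bit => if bit = '0' then count + 1 else 0) 0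

-- ===== PRECONDITION & SPEC =====
def Spec_count_trailing_zeros (binary_num : String) (out : Int) : Prop := out = count_trailing_zeros_alt binary_num
instance (binary_num : String) (out : Int) : Decidable (Spec_count_trailing_zeros binary_num out) := by unfold Spec_count_trailing_zeros; infer_instance

-- ===== CLAIM (what is proved, stated in full; the proofs are below) =====
def Claim_equal_count_trailing_zeros : Prop := ∀ (binary_num : String), Dom_count_trailing_zeros binary_num → Spec_count_trailing_zeros binary_num (count_trailing_zeros binary_num)

-- ===== LEMMAS AND PROOFS =====

theorem ctz_fold_eq_revLoop (l : List Char) :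
    l.foldl (fun count bit => if bit = '0' then count + 1 else 0) 0 = ctzRevLoop l.reverse := by
  induction l using List.reverseRecOn with
  | nil => simp [ctzRevLoop]
  | append_singleton l c ih =>
      simp only [List.foldl_append, List.foldl_cons, List.foldl_nil, List.reverse_append,
        List.reverse_cons, List.reverse_nil, List.nil_append, List.cons_append, ctzRevLoop]
      rw [ih]

-- ===== VERDICT (by name: the statement is the Claim_ definition above) =====
theorem count_trailing_zeros_spec : Claim_equal_count_trailing_zeros := by
  intro s _
  unfold Spec_count_trailing_zeros count_trailing_zeros count_trailing_zeros_alt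
  exact (ctz_fold_eq_revLoop s.toList).symm
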